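-- pv_equiv track=rewrite | github.com/Shak2000/CheckersSolver | main.py | convert_to_tile
-- ===== SOURCE A (Python) =====
-- def convert_to_tile(x, y):
--     """
--     Converts (x, y) coordinates to a 1-32 tile number.
--     Returns -1 for invalid coordinates.
--     """
--     if not (0 <= x < 8 and 0 <= y < 8 and (x + y) % 2 == 1):
--         return -1
--
--     tile = 0
--     for r in range(8):
--         for c in range(8):
--             if (r + c) % 2 == 1:  # Only dark squares have pieces
--                 tile += 1
--             if r == y and c == x:
--                 return tile
--     return -1
-- ===== SOURCE B (Python) =====
-- def convert_to_tile(x, y):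
--     """Closed form: 4 dark squares per row below y, plus x//2 dark squares before column x, plus the tile itself."""
--     if not (0 <= x < 8 and 0 <= y < 8 and (x + y) % 2 == 1):
--         return -1
--     return y * 4 + x // 2 + 1
-- ===== Notes on version B (the rewrite author's own statement) =====
-- stated objective: simpler
-- what changed: Replaced the 8x8 nested counting loop with the closed form y*4 + x//2 + 1 under the same validity guard.
import Mathlib
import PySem

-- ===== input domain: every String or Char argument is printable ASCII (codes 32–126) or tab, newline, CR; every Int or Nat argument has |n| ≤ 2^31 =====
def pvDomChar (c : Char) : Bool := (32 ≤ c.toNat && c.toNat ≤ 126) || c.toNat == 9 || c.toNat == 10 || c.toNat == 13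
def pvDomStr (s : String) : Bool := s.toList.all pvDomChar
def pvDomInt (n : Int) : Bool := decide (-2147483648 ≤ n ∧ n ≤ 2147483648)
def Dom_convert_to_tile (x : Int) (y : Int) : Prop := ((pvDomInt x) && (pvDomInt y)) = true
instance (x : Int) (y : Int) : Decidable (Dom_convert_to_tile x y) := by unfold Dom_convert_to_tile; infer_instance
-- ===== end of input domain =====

-- B replaces A's 8x8 nested counting loop by the closed form y*4 + x//2 + 1 (simpler; return value unchanged).

-- ===== PORT A =====
-- early-return nested loop: scan (r,c) in row-major order, counting dark squares, return count at (y,x)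
def convert_to_tile_loop (x : Int) (y : Int) : List (Int × Int) → Int → Int
  | [], _ => -1
  | (r, c) :: rest, tile =>
    let tile := if PySem.Int.mod (r + c) 2 = 1 then tile + 1 else tile
    if r = y ∧ c = x then tile else convert_to_tile_loop x y rest tile

def convert_to_tile (x : Int) (y : Int) : Int :=
  if 0 ≤ x ∧ x < 8 ∧ 0 ≤ y ∧ y < 8 ∧ PySem.Int.mod (x + y) 2 = 1 then
    convert_to_tile_loop x y
      ((PySem.List.pyRange 0 8 1).flatMap (fun r =>
        (PySem.List.pyRange 0 8 1).map (fun c => (r, c)))) 0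
  else -1

-- ===== PORT B =====
def convert_to_tile_alt (x : Int) (y : Int) : Int :=
  if 0 ≤ x ∧ x < 8 ∧ 0 ≤ y ∧ y < 8 ∧ PySem.Int.mod (x + y) 2 = 1 then
    y * 4 + PySem.Int.floordiv x 2 + 1
  else -1

-- ===== PRECONDITION & SPEC =====
def Spec_convert_to_tile (x : Int) (y : Int) (out : Int) : Prop := out = convert_to_tile_alt x y
instance (x : Int) (y : Int) (out : Int) : Decidable (Spec_convert_to_tile x y out) := by unfold Spec_convert_to_tile; infer_instance

-- ===== CLAIM =====
def Claim_equal_convert_to_tile : Prop := ∀ (x : Int) (y : Int), Dom_convert_to_tile x y → Spec_convert_to_tile x y (convert_to_tile x y)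

-- ===== LEMMAS AND PROOFS =====
theorem convert_eq (x y : Int) : convert_to_tile x y = convert_to_tile_alt x y := by
  by_cases h : 0 ≤ x ∧ x < 8 ∧ 0 ≤ y ∧ y < 8 ∧ PySem.Int.mod (x + y) 2 = 1
  · obtain ⟨h1, h2, h3, h4, h5⟩ := h
    unfold convert_to_tile convert_to_tile_alt
    interval_cases x <;> interval_cases y <;> revert h5 <;> decide
  · unfold convert_to_tile convert_to_tile_alt
    rw [if_neg h, if_neg h]

-- ===== VERDICT =====
theorem convert_to_tile_spec : Claim_equal_convert_to_tile := by
  intro x y _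
  unfold Spec_convert_to_tile
  exact convert_eq x y
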